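-- pv_equiv track=rewrite | github.com/Ming-J/LeetCode | CodeForces/1090M_The_Pleasant_Walk.py | check
-- ===== SOURCE A (Python) =====
-- def check(houses):
--     prev = houses[0]
--     res = 0
--     count = 1
--     for i in range(1,len(houses)):
--         if prev == houses[i]:
--             res = max(res,count)
--             count = 1
--         else:
--             count += 1
--         prev = houses[i]
--     return max(res,count)
-- ===== SOURCE B (Python) =====
-- def check(houses):
--     n = len(houses)
--     # cut positions: the boundaries where adjacent houses are equal, plus both ends
--     cuts = [0] + [i for i, (a, b) in enumerate(zip(houses, houses[1:]), 1) if a == b] + [n]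
--     # answer = largest gap between consecutive cuts
--     return max(b - a for a, b in zip(cuts, cuts[1:]))
-- ===== Notes on version B (the rewrite author's own statement) =====
-- stated objective: alternative
-- what changed: Replaces A's running reset-counter with a two-phase boundary view: collect the cut positions where adjacent houses are equal (plus both ends) and return the largest gap between consecutive cuts.
-- crash fix: On the empty list A raises IndexError (houses[0]); B returns 0, the natural walk length for an empty street. — e.g. on check([]): A raises IndexError, B returns 0
import Mathlib
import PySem

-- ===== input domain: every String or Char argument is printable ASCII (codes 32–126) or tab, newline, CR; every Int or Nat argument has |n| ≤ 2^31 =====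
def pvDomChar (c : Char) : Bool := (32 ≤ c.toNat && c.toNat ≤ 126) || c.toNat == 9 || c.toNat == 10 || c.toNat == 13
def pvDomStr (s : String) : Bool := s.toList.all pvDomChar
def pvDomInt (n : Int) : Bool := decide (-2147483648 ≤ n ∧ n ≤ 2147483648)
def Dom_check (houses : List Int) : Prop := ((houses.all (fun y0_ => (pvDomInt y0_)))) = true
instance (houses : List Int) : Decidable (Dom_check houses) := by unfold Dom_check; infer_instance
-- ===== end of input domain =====

-- B reframes the reset-counter scan as: find the equality boundaries, take the largest gap. Same cost; proof of return-value equality on nonempty lists.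

-- ===== PORT A =====
-- the for-loop of A over houses[1:], state (prev, res, count)
def checkLoop : List Int → Int → Int → Int → Int
  | [], _, res, count => max res count
  | x :: t, prev, res, count =>
    if prev = x then checkLoop t x (max res count) 1
    else checkLoop t x res (count + 1)

def check (houses : List Int) : Int :=
  match houses with
  | [] => 0          -- houses[0] raises IndexError in Python; excluded by Pre_check
  | h :: t => checkLoop t h 0 1

-- ===== PORT B =====
def check_alt (houses : List Int) : Int :=
  let n : Int := houses.length
  let cuts : List Int :=
    ((0 : Int) :: (PySem.List.enumerate (houses.zip houses.tail) 1).filterMap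
        (fun iab => if iab.2.1 = iab.2.2 then some iab.1 else none)) ++ [n]
  let gaps : List Int := (cuts.zip cuts.tail).map (fun ab => ab.2 - ab.1)
  (PySem.List.max? gaps (fun y => y)).getD 0   -- max of a nonempty list; getD arm unreachable

-- ===== PRECONDITION & SPEC =====
-- Pre_ excludes only the empty list, on which A raises IndexError at houses[0].
def Pre_check (houses : List Int) : Prop := houses ≠ []
instance (houses : List Int) : Decidable (Pre_check houses) := by unfold Pre_check; infer_instance
def pvWitness_check : List Int := [1, 2, 2]

-- On the empty list A raises IndexError (houses[0]); B returns 0, the natural walk length for an empty street (theorem check_raises below).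
def Raises_check (houses : List Int) : Prop := houses = []
instance (houses : List Int) : Decidable (Raises_check houses) := by unfold Raises_check; infer_instance
def pvRaiseWitness_check : List Int := []
def pvRaiseWitnessOut_check : Int := 0

def Spec_check (houses : List Int) (out : Int) : Prop := out = check_alt houses
instance (houses : List Int) (out : Int) : Decidable (Spec_check houses out) := by unfold Spec_check; infer_instance

-- ===== CLAIM (what is proved, stated in full; the proofs are below) =====
def Claim_equal_check : Prop := ∀ (houses : List Int), Dom_check houses → Pre_check houses → Spec_check houses (check houses)
def Claim_raises_check : Prop := (∀ (houses : List Int), Dom_check houses → Raises_check houses → ¬ Pre_check houses) ∧ (Dom_check (pvRaiseWitness_check) ∧ Raises_check (pvRaiseWitness_check) ∧ check_alt (pvRaiseWitness_check) = pvRaiseWitnessOut_check)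

-- ===== LEMMAS AND PROOFS =====

-- the sequence of maximal all-different segment lengths of p :: t, current segment length c
def lengths : Int → List Int → Int → List Int
  | _, [], c => [c]
  | p, x :: t, c => if p = x then c :: lengths x t 1 else lengths x t (c + 1)

-- absolute positions (starting at k, p sitting at k-1) where an element equals its predecessor
def idxA : Int → Int → List Int → List Int
  | _, _, [] => []
  | k, p, x :: t => if p = x then k :: idxA (k + 1) x t else idxA (k + 1) x t

-- consecutive differences of a :: l
def diffs : Int → List Int → List Int
  | _, [] => []
  | a, b :: l => (b - a) :: diffs b l

theorem checkLoop_eq_foldl (t : List Int) : ∀ (p r c : Int),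
    checkLoop t p r c = (lengths p t c).foldl max r := by
  induction t with
  | nil => intro p r c; simp [checkLoop, lengths]
  | cons x t ih =>
    intro p r c
    by_cases h : p = x <;> simp [checkLoop, lengths, h, ih]

theorem filterMap_enumerate_zip (t : List Int) : ∀ (p : Int) (k : Int),
    (PySem.List.enumerate ((p :: t).zip t) k).filterMap
      (fun iab => if iab.2.1 = iab.2.2 then some iab.1 else none) = idxA k p t := by
  induction t with
  | nil => intro p k; simp [idxA, PySem.List.enumerate_nil]
  | cons x t ih =>
    intro p k
    by_cases h : p = x <;>
      simp [PySem.List.enumerate_cons, h, idxA, ih]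

theorem map_zip_sub (l : List Int) : ∀ (a : Int),
    ((a :: l).zip l).map (fun ab => ab.2 - ab.1) = diffs a l := by
  induction l with
  | nil => intro a; simp [diffs]
  | cons b l ih => intro a; simp [diffs, ih]

theorem diffs_idxA (t : List Int) : ∀ (p k last : Int),
    diffs last (idxA k p t ++ [k + (t.length : Int)]) = lengths p t (k - last) := by
  induction t with
  | nil => intro p k last; simp [idxA, diffs, lengths]
  | cons x t ih =>
    intro p k last
    have e : k + ((x :: t).length : Int) = (k + 1) + (t.length : Int) := by simp; ring
    by_cases h : p = x
    · simp only [idxA, lengths, if_pos h, e, List.cons_append, diffs]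
      rw [ih x (k + 1) k]
      norm_num
    · simp only [idxA, lengths, if_neg h, e]
      rw [ih x (k + 1) last]
      congr 1
      ring

theorem lengths_pos (t : List Int) : ∀ (p c : Int), 1 ≤ c →
    ∀ x ∈ lengths p t c, 1 ≤ x := by
  induction t with
  | nil => intro p c hc x hx; simp [lengths] at hx; omega
  | cons y t ih =>
    intro p c hc x hx
    by_cases h : p = y
    · simp [lengths, h] at hx
      rcases hx with rfl | hx
      · exact hc
      · exact ih y 1 le_rfl x hx
    · simp [lengths, h] at hx
      exact ih y (c + 1) (by omega) x hx

theorem lengths_ne_nil (t : List Int) : ∀ (p c : Int), lengths p t c ≠ [] := by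
  induction t with
  | nil => intro p c; simp [lengths]
  | cons y t ih =>
    intro p c
    by_cases h : p = y <;> simp [lengths, h, ih]

theorem max_getD_eq_foldl (l : List Int) (hne : l ≠ []) (hpos : ∀ x ∈ l, (1 : Int) ≤ x) :
    (PySem.List.max? l (fun y => y)).getD 0 = l.foldl max 0 := by
  cases l with
  | nil => exact absurd rfl hne
  | cons g gs =>
    rw [PySem.List.max?_id_cons]
    have hg : (1 : Int) ≤ g := hpos g (by simp)
    have : max 0 g = g := by omega
    simp [List.foldl, this]

-- ===== VERDICT (by name: the statement is the Claim_ definition above) =====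
theorem check_spec : Claim_equal_check := by
  intro houses _ hpre
  unfold Spec_check
  cases houses with
  | nil => exact absurd rfl hpre
  | cons h t =>
    show checkLoop t h 0 1 = check_alt (h :: t)
    rw [checkLoop_eq_foldl]
    unfold check_alt
    simp only [List.cons_append, List.tail_cons]
    rw [filterMap_enumerate_zip, map_zip_sub]
    have hd : diffs 0 (idxA 1 h t ++ [(((h :: t).length : Nat) : Int)]) = lengths h t 1 := by
      have e : (((h :: t).length : Nat) : Int) = 1 + (t.length : Int) := by simp; ring
      rw [e]
      simpa using diffs_idxA t h 1 0
    rw [hd, max_getD_eq_foldl _ (lengths_ne_nil t h 1) (lengths_pos t h 1 le_rfl)]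

theorem check_raises : Claim_raises_check := by
  unfold Claim_raises_check
  exact ⟨fun houses _ hr hp => hp hr, by decide⟩

-- self-check: the crash-fix witness value really is what check_alt returns on []
theorem check_raises_witness_ok : check_alt pvRaiseWitness_check = pvRaiseWitnessOut_check :=
  check_raises.2.2.2
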